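-- pv_equiv track=rewrite | github.com/ever-oli/io | packages/io-ai/src/io_ai/models.py | _find_openrouter_slug
-- ===== SOURCE A (Python) =====
-- from typing import Any, Optional
--
-- OPENROUTER_MODELS: list[tuple[str, str]] = [
--     ("anthropic/claude-opus-4.6", "recommended"),
--     ("anthropic/claude-sonnet-4.5", ""),
--     ("anthropic/claude-haiku-4.5", ""),
--     ("openai/gpt-5.4", ""),
--     ("openai/gpt-5.4-mini", ""),
--     ("openrouter/hunter-alpha", "free"),
--     ("openrouter/healer-alpha", "free"),
--     ("openai/gpt-5.3-codex", ""),
--     ("google/gemini-3-pro-preview", ""),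
--     ("google/gemini-3-flash-preview", ""),
--     ("qwen/qwen3.5-plus-02-15", ""),
--     ("qwen/qwen3.5-35b-a3b", ""),
--     ("stepfun/step-3.5-flash", ""),
--     ("minimax/minimax-m2.5", ""),
--     ("z-ai/glm-5", ""),
--     ("z-ai/glm-5-turbo", ""),
--     ("moonshotai/kimi-k2.5", ""),
--     ("x-ai/grok-4.20-beta", ""),
--     ("nvidia/nemotron-3-super-120b-a12b:free", "free"),
--     ("arcee-ai/trinity-large-preview:free", "free"),
--     ("openai/gpt-5.4-pro", ""),
--     ("openai/gpt-5.4-nano", ""),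
-- ]
--
-- def _find_openrouter_slug(model_name: str) -> Optional[str]:
--     name_lower = model_name.strip().lower()
--     if not name_lower:
--         return None
--
--     for model_id, _ in OPENROUTER_MODELS:
--         if name_lower == model_id.lower():
--             return model_id
--
--     for model_id, _ in OPENROUTER_MODELS:
--         if "/" in model_id:
--             _, model_part = model_id.split("/", 1)
--             if name_lower == model_part.lower():
--                 return model_id
--     return None
-- ===== SOURCE B (Python) =====
-- OPENROUTER_MODELS: list[tuple[str, str]] = [
--     ("anthropic/claude-opus-4.6", "recommended"),
--     ("anthropic/claude-sonnet-4.5", ""),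
--     ("anthropic/claude-haiku-4.5", ""),
--     ("openai/gpt-5.4", ""),
--     ("openai/gpt-5.4-mini", ""),
--     ("openrouter/hunter-alpha", "free"),
--     ("openrouter/healer-alpha", "free"),
--     ("openai/gpt-5.3-codex", ""),
--     ("google/gemini-3-pro-preview", ""),
--     ("google/gemini-3-flash-preview", ""),
--     ("qwen/qwen3.5-plus-02-15", ""),
--     ("qwen/qwen3.5-35b-a3b", ""),
--     ("stepfun/step-3.5-flash", ""),
--     ("minimax/minimax-m2.5", ""),
--     ("z-ai/glm-5", ""),
--     ("z-ai/glm-5-turbo", ""),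
--     ("moonshotai/kimi-k2.5", ""),
--     ("x-ai/grok-4.20-beta", ""),
--     ("nvidia/nemotron-3-super-120b-a12b:free", "free"),
--     ("arcee-ai/trinity-large-preview:free", "free"),
--     ("openai/gpt-5.4-pro", ""),
--     ("openai/gpt-5.4-nano", ""),
-- ]
--
-- # Precomputed lookup table: suffix keys first (first occurrence wins via setdefault),
-- # then exact lowered slugs (they contain '/', so they never collide with a suffix key).
-- _SLUG_BY_NAME: dict = {}
-- for _mid, _ in OPENROUTER_MODELS:
--     if "/" in _mid:
--         _SLUG_BY_NAME.setdefault(_mid.split("/", 1)[1].lower(), _mid)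
-- for _mid, _ in OPENROUTER_MODELS:
--     _SLUG_BY_NAME[_mid.lower()] = _mid
--
-- def _find_openrouter_slug(model_name):
--     name_lower = model_name.strip().lower()
--     if not name_lower:
--         return None
--     return _SLUG_BY_NAME.get(name_lower)
-- ===== Notes on version B (the rewrite author's own statement) =====
-- stated objective: alternative
-- what changed: Replaced A's two per-call scans over OPENROUTER_MODELS with a lookup table built once at module load (suffix keys inserted first with setdefault, exact lowered slugs then added), so each call is a single dict lookup; correct because every exact key contains a slash while no suffix key does, so the key sets are disjoint and exact matches still win.
import Mathlib
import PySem

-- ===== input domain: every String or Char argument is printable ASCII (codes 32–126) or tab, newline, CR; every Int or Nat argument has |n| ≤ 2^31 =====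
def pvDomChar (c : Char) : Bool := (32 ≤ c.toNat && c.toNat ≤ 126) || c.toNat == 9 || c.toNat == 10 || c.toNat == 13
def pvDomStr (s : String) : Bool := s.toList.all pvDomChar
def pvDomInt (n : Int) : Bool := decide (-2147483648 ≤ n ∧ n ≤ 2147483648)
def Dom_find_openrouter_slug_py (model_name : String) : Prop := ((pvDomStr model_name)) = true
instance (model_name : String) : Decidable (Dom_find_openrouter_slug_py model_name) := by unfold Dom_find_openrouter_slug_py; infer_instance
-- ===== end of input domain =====

-- B replaces A's two per-call scans by a lookup table built once (suffix keys via
-- setdefault, then exact lowered slugs); each call is a single dict lookup.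

def pvOpenrouterModels : List (String × String) := [
  ("anthropic/claude-opus-4.6", "recommended"),
  ("anthropic/claude-sonnet-4.5", ""),
  ("anthropic/claude-haiku-4.5", ""),
  ("openai/gpt-5.4", ""),
  ("openai/gpt-5.4-mini", ""),
  ("openrouter/hunter-alpha", "free"),
  ("openrouter/healer-alpha", "free"),
  ("openai/gpt-5.3-codex", ""),
  ("google/gemini-3-pro-preview", ""),
  ("google/gemini-3-flash-preview", ""),
  ("qwen/qwen3.5-plus-02-15", ""),
  ("qwen/qwen3.5-35b-a3b", ""),
  ("stepfun/step-3.5-flash", ""),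
  ("minimax/minimax-m2.5", ""),
  ("z-ai/glm-5", ""),
  ("z-ai/glm-5-turbo", ""),
  ("moonshotai/kimi-k2.5", ""),
  ("x-ai/grok-4.20-beta", ""),
  ("nvidia/nemotron-3-super-120b-a12b:free", "free"),
  ("arcee-ai/trinity-large-preview:free", "free"),
  ("openai/gpt-5.4-pro", ""),
  ("openai/gpt-5.4-nano", "")]

-- ===== PORT A =====
-- A's first for-loop (early return on exact match)
def pvScanExact (s : String) : List (String × String) → Option String
  | [] => none
  | (model_id, _) :: rest =>
      if s = PySem.Str.lower model_id then some model_id else pvScanExact s rest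

-- A's second for-loop (early return on suffix-after-'/' match)
def pvScanSuffix (s : String) : List (String × String) → Option String
  | [] => none
  | (model_id, _) :: rest =>
      if PySem.Str.isIn "/" model_id then
        match PySem.Str.splitMax? model_id "/" 1 with
        | some (_ :: model_part :: _) =>
            if s = PySem.Str.lower model_part then some model_id else pvScanSuffix s rest
        | _ => pvScanSuffix s rest
      else pvScanSuffix s rest

def find_openrouter_slug_py (model_name : String) : Option String :=
  let name_lower := PySem.Str.lower (PySem.Str.strip model_name)
  if name_lower = "" then none
  else
    match pvScanExact name_lower pvOpenrouterModels with
    | some r => some r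
    | none => pvScanSuffix name_lower pvOpenrouterModels

-- ===== PORT B =====
-- B's module-level table: suffix-key setdefault loop, then exact-key insert loop
def pvSlugByName : PySem.Dict String String :=
  let d := pvOpenrouterModels.foldl (fun d p =>
    if PySem.Str.isIn "/" p.1 then
      match PySem.Str.splitMax? p.1 "/" 1 with
      | some (_ :: part :: _) => d.setdefault (PySem.Str.lower part) p.1
      | _ => d
    else d) PySem.Dict.empty
  pvOpenrouterModels.foldl (fun d p => d.insert (PySem.Str.lower p.1) p.1) d

def find_openrouter_slug_py_alt (model_name : String) : Option String :=
  let name_lower := PySem.Str.lower (PySem.Str.strip model_name)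
  if name_lower = "" then none
  else pvSlugByName.get? name_lower

-- ===== PRECONDITION & SPEC =====
def Spec_find_openrouter_slug_py (model_name : String) (out : Option String) : Prop := out = find_openrouter_slug_py_alt model_name
instance (model_name : String) (out : Option String) : Decidable (Spec_find_openrouter_slug_py model_name out) := by unfold Spec_find_openrouter_slug_py; infer_instance

-- ===== CLAIM (what is proved, stated in full; the proofs are below) =====
def Claim_equal_find_openrouter_slug_py : Prop := ∀ (model_name : String), Dom_find_openrouter_slug_py model_name → Spec_find_openrouter_slug_py model_name (find_openrouter_slug_py model_name)

-- ===== LEMMAS AND PROOFS =====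

-- first-match lookup in an association list
def pvLook (t : String) : List (String × String) → Option String
  | [] => none
  | (k, v) :: rest => if k = t then some v else pvLook t rest

-- the key/value pair A's exact pass associates to an entry
def pvEKey (p : String × String) : String × String := (PySem.Str.lower p.1, p.1)

-- the key/value pair A's suffix pass associates to an entry (none if skipped)
def pvSKey (p : String × String) : Option (String × String) :=
  if PySem.Str.isIn "/" p.1 then
    match PySem.Str.splitMax? p.1 "/" 1 with
    | some (_ :: part :: _) => some (PySem.Str.lower part, p.1)
    | _ => none
  else none

theorem pvScanExact_eq (t : String) (L : List (String × String)) :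
    pvScanExact t L = pvLook t (L.map pvEKey) := by
  induction L with
  | nil => rfl
  | cons hd rest ih =>
      obtain ⟨mid, tag⟩ := hd
      by_cases h : t = PySem.Str.lower mid
      · simp [pvScanExact, pvLook, pvEKey, h]
      · simp [pvScanExact, pvLook, pvEKey, h, Ne.symm h, ih]

theorem pvScanSuffix_eq (t : String) (L : List (String × String)) :
    pvScanSuffix t L = pvLook t (L.filterMap pvSKey) := by
  induction L with
  | nil => rfl
  | cons hd rest ih =>
      obtain ⟨mid, tag⟩ := hd
      by_cases hi : PySem.Chars.isIn ['/'] mid.toList = true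
      · cases hsp : PySem.Str.splitMax? mid "/" 1 with
        | none => simp [pvScanSuffix, pvSKey, hi, hsp, ih]
        | some parts =>
            match parts with
            | [] => simp [pvScanSuffix, pvSKey, hi, hsp, ih]
            | [_] => simp [pvScanSuffix, pvSKey, hi, hsp, ih]
            | _ :: part :: _ =>
                by_cases hm : t = PySem.Str.lower part
                · simp [pvScanSuffix, pvSKey, pvLook, hi, hsp, hm]
                · simp [pvScanSuffix, pvSKey, pvLook, hi, hsp, hm, Ne.symm hm, ih]
      · simp [pvScanSuffix, pvSKey, hi, ih]

theorem pvLook_append (t : String) (X Y : List (String × String)) :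
    pvLook t (X ++ Y) = match pvLook t X with
                        | some v => some v
                        | none => pvLook t Y := by
  induction X with
  | nil => simp [pvLook]
  | cons hd rest ih =>
      obtain ⟨k, v⟩ := hd
      by_cases h : k = t <;> simp [pvLook, h, ih]

theorem pvLook_mem (t : String) (X : List (String × String)) (v : String)
    (h : pvLook t X = some v) : t ∈ X.map Prod.fst := by
  induction X with
  | nil => simp [pvLook] at h
  | cons hd rest ih =>
      obtain ⟨k, w⟩ := hd
      by_cases hk : k = t
      · simp [hk]
      · simp [pvLook, hk] at h
        simp [ih h]

theorem pvLook_comm (t : String) (X Y : List (String × String))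
    (hdis : ∀ k, k ∈ X.map Prod.fst → k ∉ Y.map Prod.fst) :
    pvLook t (X ++ Y) = pvLook t (Y ++ X) := by
  rw [pvLook_append, pvLook_append]
  cases hX : pvLook t X with
  | some v =>
      cases hY : pvLook t Y with
      | some w => exact absurd (pvLook_mem t Y w hY) (hdis t (pvLook_mem t X v hX))
      | none => simp
  | none => cases hY : pvLook t Y <;> simp

theorem pvGet?_mk (t : String) (ls : List (String × String)) :
    (PySem.Dict.mk ls).get? t = pvLook t ls := by
  induction ls with
  | nil => rfl
  | cons hd rest ih =>
      obtain ⟨k, v⟩ := hd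
      rw [PySem.Dict.get?_mk_cons]
      by_cases h : k = t <;> simp [pvLook, h, ih]

set_option maxRecDepth 20000 in
-- the table B builds is exactly: suffix pairs (first wins) then exact pairs
theorem pvSlugByName_items :
    pvSlugByName = PySem.Dict.mk
      (pvOpenrouterModels.filterMap pvSKey ++ pvOpenrouterModels.map pvEKey) := by
  decide

-- the exact keys (contain '/') and the suffix keys (do not) are disjoint
theorem pvKeys_disjoint : ∀ k, k ∈ (pvOpenrouterModels.map pvEKey).map Prod.fst →
    k ∉ (pvOpenrouterModels.filterMap pvSKey).map Prod.fst := by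
  have h : ((pvOpenrouterModels.map pvEKey).map Prod.fst).all
      (fun k => !((pvOpenrouterModels.filterMap pvSKey).map Prod.fst).contains k) = true := by
    decide
  intro k hk
  have h2 := List.all_eq_true.mp h k hk
  simpa using h2

theorem find_openrouter_slug_py_eq (model_name : String) :
    find_openrouter_slug_py model_name = find_openrouter_slug_py_alt model_name := by
  unfold find_openrouter_slug_py find_openrouter_slug_py_alt
  by_cases h : PySem.Str.lower (PySem.Str.strip model_name) = ""
  · simp [h]
  · simp only [h, if_false]
    rw [pvScanExact_eq, pvScanSuffix_eq, pvSlugByName_items, pvGet?_mk, ← pvLook_append]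
    exact pvLook_comm _ _ _ pvKeys_disjoint

-- ===== VERDICT (by name: the statement is the Claim_ definition above) =====
theorem find_openrouter_slug_py_spec : Claim_equal_find_openrouter_slug_py := by
  intro model_name _
  unfold Spec_find_openrouter_slug_py
  exact find_openrouter_slug_py_eq model_name
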